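-- pv_equiv track=rewrite | github.com/phrrngtn/blobrange | python/blobrange/types.py | _looks_like_date_format
-- ===== SOURCE A (Python) =====
-- def _looks_like_date_format(fmt: str) -> bool:
--     """Heuristic: does an Excel NumberFormat string look like a date format?"""
--     # Strip quoted literals.
--     cleaned = ""
--     in_quote = False
--     for ch in fmt:
--         if ch == '"':
--             in_quote = not in_quote
--         elif not in_quote:
--             cleaned += ch
--     # Check for date/time tokens.
--     lower = cleaned.lower()
--     return any(tok in lower for tok in ("yyyy", "yy", "mm", "dd", "hh", "ss", "am/pm"))
-- ===== SOURCE B (Python) =====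
-- def _looks_like_date_format(fmt: str) -> bool:
--     """Heuristic: does an Excel NumberFormat string look like a date format?"""
--     # Even-indexed segments of the double-quote split are exactly the text outside quotes.
--     lower = "".join(fmt.split('"')[::2]).lower()
--     return any(tok in lower for tok in ("yyyy", "yy", "mm", "dd", "hh", "ss", "am/pm"))
-- ===== Notes on version B (the rewrite author's own statement) =====
-- stated objective: idiomatic
-- what changed: The char-by-char quote-toggling state machine is replaced by splitting on the double-quote character and joining the even-indexed (outside-quotes) segments before the same token test.
import Mathlib
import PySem

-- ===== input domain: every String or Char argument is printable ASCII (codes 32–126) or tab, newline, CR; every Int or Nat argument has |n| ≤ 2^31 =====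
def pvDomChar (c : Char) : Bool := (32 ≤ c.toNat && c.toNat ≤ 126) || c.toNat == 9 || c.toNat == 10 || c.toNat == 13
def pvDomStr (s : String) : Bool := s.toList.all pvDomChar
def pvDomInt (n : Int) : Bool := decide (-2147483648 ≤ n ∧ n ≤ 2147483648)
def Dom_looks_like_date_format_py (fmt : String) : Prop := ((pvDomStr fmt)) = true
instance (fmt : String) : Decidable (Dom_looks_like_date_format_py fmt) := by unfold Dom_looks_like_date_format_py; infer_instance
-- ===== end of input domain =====

-- B replaces A's char-by-char quote-toggling loop by split-on-'"'/join-even-segments (idiomatic decomposition; same result).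

-- ===== PORT A =====
-- the loop: state (cleaned, in_quote); branches in A's order
def looks_like_date_format_py (fmt : String) : Bool :=
  let st := fmt.toList.foldl
    (fun (st : List Char × Bool) ch =>
      if ch = '"' then (st.1, !st.2)
      else if !st.2 then (st.1 ++ [ch], st.2)
      else st)
    ([], false)
  let lower := PySem.Chars.lower st.1
  [String.toList "yyyy", String.toList "yy", String.toList "mm", String.toList "dd",
   String.toList "hh", String.toList "ss", String.toList "am/pm"].any
    (fun tok => PySem.Chars.isIn tok lower)

-- ===== PORT B =====
def looks_like_date_format_py_alt (fmt : String) : Bool :=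
  let parts := PySem.Chars.splitOn fmt.toList ['"']
  -- parts[::2]; step 2 ≠ 0, so slice? is always `some` (the getD default is unreachable)
  let evens := (PySem.List.slice? parts none none 2).getD []
  let lower := PySem.Chars.lower (PySem.Chars.join [] evens)
  [String.toList "yyyy", String.toList "yy", String.toList "mm", String.toList "dd",
   String.toList "hh", String.toList "ss", String.toList "am/pm"].any
    (fun tok => PySem.Chars.isIn tok lower)

-- ===== PRECONDITION & SPEC =====
def Spec_looks_like_date_format_py (fmt : String) (out : Bool) : Prop := out = looks_like_date_format_py_alt fmt
instance (fmt : String) (out : Bool) : Decidable (Spec_looks_like_date_format_py fmt out) := by unfold Spec_looks_like_date_format_py; infer_instance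

-- ===== CLAIM (what is proved, stated in full; the proofs are below) =====
def Claim_equal_looks_like_date_format_py : Prop := ∀ (fmt : String), Dom_looks_like_date_format_py fmt → Spec_looks_like_date_format_py fmt (looks_like_date_format_py fmt)

-- ===== LEMMAS AND PROOFS =====

-- A's loop as a structural recursion
def pvStrip : List Char → Bool → List Char
  | [], _ => []
  | c :: t, q => if c = '"' then pvStrip t (!q) else if !q then c :: pvStrip t q else pvStrip t q

lemma pvFoldl_strip (l : List Char) (acc : List Char) (q : Bool) :
    (l.foldl (fun (st : List Char × Bool) ch =>
        if ch = '"' then (st.1, !st.2)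
        else if !st.2 then (st.1 ++ [ch], st.2)
        else st) (acc, q)).1 = acc ++ pvStrip l q := by
  induction l generalizing acc q with
  | nil => simp [pvStrip]
  | cons c t ih =>
    rw [List.foldl_cons]
    by_cases hc : c = '"'
    · rw [if_pos hc, ih]
      simp [pvStrip, hc]
    · rw [if_neg hc]
      cases q with
      | false =>
        rw [if_pos (show (!(Prod.snd (acc, (false : Bool)))) = true from rfl), ih]
        simp [pvStrip, hc]
      | true =>
        rw [if_neg (show ¬(!(Prod.snd (acc, (true : Bool)))) = true from by simp), ih]
        simp [pvStrip, hc]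

-- split on '"' as a structural recursion: (first segment, remaining segments)
def pvSplitChar : List Char → List Char × List (List Char)
  | [] => ([], [])
  | c :: t =>
    if c = '"' then ([], (pvSplitChar t).1 :: (pvSplitChar t).2)
    else (c :: (pvSplitChar t).1, (pvSplitChar t).2)

-- pvEO ps true = join of even-indexed segments; pvEO ps false = join of odd-indexed ones
def pvEO : List (List Char) → Bool → List Char
  | [], _ => []
  | s :: t, true => s ++ pvEO t false
  | _ :: t, false => pvEO t true

lemma pvSplitChar_strip (l : List Char) :
    (pvSplitChar l).1 ++ pvEO (pvSplitChar l).2 false = pvStrip l false ∧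
      pvEO (pvSplitChar l).2 true = pvStrip l true := by
  induction l with
  | nil => simp [pvSplitChar, pvStrip, pvEO]
  | cons c t ih =>
    by_cases hc : c = '"'
    · constructor
      · rw [pvStrip, if_pos hc]
        simp only [pvSplitChar, if_pos hc, pvEO]
        exact ih.2
      · rw [pvStrip, if_pos hc]
        simp only [pvSplitChar, if_pos hc, pvEO]
        exact ih.1
    · constructor
      · rw [pvStrip, if_neg hc]
        simp only [pvSplitChar, if_neg hc]
        simpa using ih.1
      · rw [pvStrip, if_neg hc]
        simp only [pvSplitChar, if_neg hc]
        exact ih.2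

lemma pvGo_eq (fuel : Nat) (l cur : List Char) (acc : List (List Char)) (h : l.length ≤ fuel) :
    PySem.Chars.splitOn.go ['"'] fuel l cur acc =
      acc.reverse ++ (cur.reverse ++ (pvSplitChar l).1) :: (pvSplitChar l).2 := by
  induction l generalizing fuel cur acc with
  | nil =>
    cases fuel <;> simp [PySem.Chars.splitOn.go, pvSplitChar]
  | cons c t ih =>
    cases fuel with
    | zero => simp at h
    | succ f =>
      rw [PySem.Chars.splitOn.go]
      by_cases hc : c = '"'
      · have hp : List.isPrefixOf ['"'] (c :: t) = true := by
          simp [List.isPrefixOf, hc]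
        rw [if_pos hp]
        have := ih f [] ((cur.reverse :: acc)) (by simpa using Nat.lt_succ_iff.mp (by simpa using h))
        rw [show List.drop (['"'] : List Char).length (c :: t) = t by simp]
        rw [this]
        simp [pvSplitChar, if_pos hc]
      · have hp : List.isPrefixOf ['"'] (c :: t) = false := by
          simp [List.isPrefixOf]
          exact fun hh => absurd hh.symm hc
        rw [if_neg (by simp [hp])]
        rw [ih f (c :: cur) acc (by simpa using Nat.lt_succ_iff.mp (by simpa using h))]
        simp [pvSplitChar, if_neg hc]

lemma pvSplitOn_eq (l : List Char) :
    PySem.Chars.splitOn l ['"'] = (pvSplitChar l).1 :: (pvSplitChar l).2 := by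
  have := pvGo_eq (l.length + 1) l [] [] (by omega)
  simpa [PySem.Chars.splitOn] using this

-- even-indexed elements
def pvEvenIdx : List (List Char) → List (List Char)
  | [] => []
  | [a] => [a]
  | a :: _ :: t => a :: pvEvenIdx t

lemma pvEvenIdx_cons (a : List Char) (t : List (List Char)) :
    pvEvenIdx (a :: t) = a :: pvEvenIdx (t.drop 1) := by
  cases t <;> simp [pvEvenIdx]

lemma pvFilterMap_even (m : Nat) (xs : List (List Char)) (h : xs.length ≤ 2 * m) :
    (List.range m).filterMap (fun k => xs[2 * k]?) = pvEvenIdx xs := by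
  induction m generalizing xs with
  | zero =>
    have : xs = [] := by
      cases xs with
      | nil => rfl
      | cons a t => simp at h
    subst this; simp [pvEvenIdx]
  | succ m ih =>
    cases xs with
    | nil => simp [pvEvenIdx]
    | cons a t =>
      rw [List.range_succ_eq_map]
      rw [List.filterMap_cons]
      simp only [Nat.mul_zero, List.getElem?_cons_zero]
      rw [List.filterMap_map]
      have heq : ((fun k => (a :: t)[2 * k]?) ∘ Nat.succ) = fun k => (t.drop 1)[2 * k]? := by
        funext k
        show (a :: t)[2 * (k + 1)]? = (t.drop 1)[2 * k]?
        rw [List.getElem?_drop, show 2 * (k + 1) = (2 * k + 1) + 1 from by omega,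
          List.getElem?_cons_succ, Nat.add_comm]
      rw [heq, ih (t.drop 1) (by simp at h ⊢; omega), pvEvenIdx_cons]

lemma pvSlice2_eq (xs : List (List Char)) :
    PySem.List.slice? xs none none 2 = some (pvEvenIdx xs) := by
  simp only [PySem.List.slice?, PySem.List.sliceIndices]
  norm_num
  rw [← pvFilterMap_even (((xs.length : Int) + 1) / 2).toNat xs (by omega)]
  congr 1
  congr 1
  split_ifs with h <;> omega

lemma pvJoin_nil_cons (a : List Char) (t : List (List Char)) :
    PySem.Chars.join [] (a :: t) = a ++ PySem.Chars.join [] t := by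
  cases t <;> simp [PySem.Chars.join, List.intercalate]

lemma pvJoin_even (ps : List (List Char)) :
    PySem.Chars.join [] (pvEvenIdx ps) = pvEO ps true := by
  induction ps using pvEvenIdx.induct with
  | case1 => simp [pvEvenIdx, pvEO, PySem.Chars.join, List.intercalate]
  | case2 a => simp [pvEvenIdx, pvEO, PySem.Chars.join, List.intercalate]
  | case3 a b t ih =>
    rw [pvEvenIdx, pvJoin_nil_cons, ih]
    simp [pvEO]

lemma pvCleaned_eq (l : List Char) :
    PySem.Chars.join []
        ((PySem.List.slice? (PySem.Chars.splitOn l ['"']) none none 2).getD []) =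
      (l.foldl (fun (st : List Char × Bool) ch =>
          if ch = '"' then (st.1, !st.2)
          else if !st.2 then (st.1 ++ [ch], st.2)
          else st) ([], false)).1 := by
  rw [pvFoldl_strip, pvSplitOn_eq, pvSlice2_eq]
  simp only [Option.getD_some, List.nil_append]
  rw [pvJoin_even, pvEO]
  exact (pvSplitChar_strip l).1

-- ===== VERDICT (by name: the statement is the Claim_ definition above) =====
theorem looks_like_date_format_py_spec : Claim_equal_looks_like_date_format_py := by
  intro fmt _
  simp only [Spec_looks_like_date_format_py, looks_like_date_format_py,
    looks_like_date_format_py_alt]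
  rw [pvCleaned_eq]
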